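-- pv_equiv track=rewrite | github.com/jadkik/emailipy | emailipy/inliner.py | _selector_specificity
-- ===== SOURCE A (Python) =====
-- IMPORTANT_MULTIPLIER = 9000
--
-- def _selector_specificity(selector, priority):
--     class_weight = selector.count(".")
--     id_weight = selector.count("#")
--     element_weight = len([a for a in selector.split(" ") if not (a.startswith(".") or a.startswith("#"))])
--     weight = element_weight + class_weight * 10 + element_weight * id_weight * 100
--     if priority:
--         weight *= IMPORTANT_MULTIPLIER
--     return weight
-- ===== SOURCE B (Python) =====
-- IMPORTANT_MULTIPLIER = 9000
--
-- def _selector_specificity(selector, priority):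
--     # Character-level scan: no tokenization at all.  A '.'/'#' whose previous
--     # character is a space (or start of string) begins a class/id token; the
--     # number of tokens split(' ') would produce is spaces + 1, so the element
--     # count is that minus the tokens that start with '.' or '#'.
--     class_weight = 0
--     id_weight = 0
--     prefixed_tokens = 0
--     spaces = 0
--     prev = ' '  # virtual space before the first character
--     for ch in selector:
--         if ch == '.':
--             class_weight += 1
--             if prev == ' ':
--                 prefixed_tokens += 1
--         elif ch == '#':
--             id_weight += 1
--             if prev == ' ':
--                 prefixed_tokens += 1
--         elif ch == ' ':
--             spaces += 1
--         prev = ch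
--     element_weight = spaces + 1 - prefixed_tokens
--     weight = element_weight + class_weight * 10 + element_weight * id_weight * 100
--     if priority:
--         weight *= IMPORTANT_MULTIPLIER
--     return weight
-- ===== Notes on version B (the rewrite author's own statement) =====
-- stated objective: alternative
-- what changed: B never tokenizes: a single character-level scan with a previous-character state detects class/id-prefixed token starts, and the element count is obtained by the closed form spaces + 1 - prefixed_tokens instead of filtering selector.split(' ').
import Mathlib
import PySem

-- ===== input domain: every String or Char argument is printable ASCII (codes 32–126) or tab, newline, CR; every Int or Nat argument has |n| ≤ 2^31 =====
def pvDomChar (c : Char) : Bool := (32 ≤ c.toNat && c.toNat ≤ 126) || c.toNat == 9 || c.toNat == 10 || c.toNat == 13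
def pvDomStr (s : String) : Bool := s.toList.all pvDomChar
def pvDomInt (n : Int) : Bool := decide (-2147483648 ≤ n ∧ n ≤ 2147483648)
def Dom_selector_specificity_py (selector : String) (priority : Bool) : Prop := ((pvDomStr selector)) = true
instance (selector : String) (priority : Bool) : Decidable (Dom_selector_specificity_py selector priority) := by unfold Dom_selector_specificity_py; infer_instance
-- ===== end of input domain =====

-- B replaces A's split-and-filter tokenization by a single character scan with a
-- previous-character state and the closed form spaces + 1 - prefixed_tokens for
-- the element count (objective: alternative algorithm, same cost).

-- ===== PORT A =====
def selector_specificity_py (selector : String) (priority : Bool) : Int :=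
  let class_weight : Int := PySem.Str.count selector "."
  let id_weight : Int := PySem.Str.count selector "#"
  let element_weight : Int :=
    (((PySem.Str.split? selector " ").getD []).filter
      (fun a => !(PySem.Str.startswith a "." || PySem.Str.startswith a "#"))).length
  let weight := element_weight + class_weight * 10 + element_weight * id_weight * 100
  if priority then weight * 9000 else weight

-- ===== PORT B =====
-- loop body of Source B: one character updates the four tallies and the previous-char state
def specAltStep (acc : Int × Int × Int × Int × Char) (ch : Char) :
    Int × Int × Int × Int × Char :=
  let (cls, idw, pref, sp, prev) := acc
  if ch = '.' then (cls + 1, idw, if prev = ' ' then pref + 1 else pref, sp, ch)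
  else if ch = '#' then (cls, idw + 1, if prev = ' ' then pref + 1 else pref, sp, ch)
  else if ch = ' ' then (cls, idw, pref, sp + 1, ch)
  else (cls, idw, pref, sp, ch)

def selector_specificity_py_alt (selector : String) (priority : Bool) : Int :=
  let r := selector.toList.foldl specAltStep (0, 0, 0, 0, ' ')
  let element_weight := r.2.2.2.1 + 1 - r.2.2.1
  let weight := element_weight + r.1 * 10 + element_weight * r.2.1 * 100
  if priority then weight * 9000 else weight

-- ===== PRECONDITION & SPEC =====
def Spec_selector_specificity_py (selector : String) (priority : Bool) (out : Int) : Prop := out = selector_specificity_py_alt selector priority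
instance (selector : String) (priority : Bool) (out : Int) : Decidable (Spec_selector_specificity_py selector priority out) := by unfold Spec_selector_specificity_py; infer_instance

-- ===== CLAIM (what is proved, stated in full; the proofs are below) =====
def Claim_equal_selector_specificity_py : Prop := ∀ (selector : String) (priority : Bool), Dom_selector_specificity_py selector priority → Spec_selector_specificity_py selector priority (selector_specificity_py selector priority)

-- ===== LEMMAS AND PROOFS =====

-- simple reference splitter on ' ' (proof-only)
def split0 : List Char → List (List Char)
  | [] => [[]]
  | c :: l => if c = ' ' then [] :: split0 l else (split0 l).modifyHead (c :: ·)

-- does a token start with '.' or '#'?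
def prefTok (t : List Char) : Bool :=
  match t with
  | [] => false
  | c :: _ => c = '.' || c = '#'

-- number of '.'/'#' characters directly preceded by a space (prev = state before the list)
def pcount (p : Char) : List Char → Int
  | [] => 0
  | c :: t => (if (c = '.' ∨ c = '#') ∧ p = ' ' then 1 else 0) + pcount c t

-- last character, defaulting to p
def lastc (p : Char) : List Char → Char
  | [] => p
  | c :: t => lastc c t

theorem split0_ne_nil (l : List Char) : split0 l ≠ [] := by
  induction l with
  | nil => simp [split0]
  | cons c l ih =>
    simp only [split0]
    split_ifs
    · simp
    · cases h : split0 l with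
      | nil => exact absurd h ih
      | cons a as => simp

theorem count_go_eq (c : Char) (l : List Char) : ∀ (fuel acc : Nat), l.length ≤ fuel →
    PySem.Chars.count.go [c] fuel l acc = acc + l.count c := by
  induction l with
  | nil => intro fuel acc h; cases fuel <;> simp [PySem.Chars.count.go]
  | cons d t ih =>
    intro fuel acc h
    simp only [List.length_cons] at h
    cases fuel with
    | zero => omega
    | succ fuel =>
      rw [PySem.Chars.count.go]
      have hpre : ([c].isPrefixOf (d :: t)) = (c == d) := by simp [List.isPrefixOf]
      rw [hpre]
      by_cases hd : c = d
      · subst hd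
        rw [if_pos (by simp)]
        simp only [List.length_cons, List.length_nil, List.drop_succ_cons, List.drop_zero]
        rw [ih fuel (acc + 1) (by omega)]
        rw [List.count_cons]
        simp only [BEq.rfl, if_true]
        omega
      · rw [if_neg (by simp [hd])]
        rw [ih fuel acc (by omega)]
        rw [List.count_cons]
        simp [Ne.symm hd]

theorem count_singleton (c : Char) (l : List Char) :
    PySem.Chars.count l [c] = l.count c := by
  have := count_go_eq c l l.length 0 le_rfl
  simpa [PySem.Chars.count] using this

theorem splitOn_go_eq (l : List Char) : ∀ (fuel : Nat) (cur : List Char) (acc : List (List Char)),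
    l.length ≤ fuel →
    PySem.Chars.splitOn.go [' '] fuel l cur acc =
      acc.reverse ++ (split0 l).modifyHead (cur.reverse ++ ·) := by
  induction l with
  | nil =>
    intro fuel cur acc h
    cases fuel <;> simp [PySem.Chars.splitOn.go, split0]
  | cons d t ih =>
    intro fuel cur acc h
    simp only [List.length_cons] at h
    cases fuel with
    | zero => omega
    | succ fuel =>
      rw [PySem.Chars.splitOn.go]
      have hpre : ([' '].isPrefixOf (d :: t)) = (' ' == d) := by simp [List.isPrefixOf]
      rw [hpre]
      by_cases hd : d = ' '
      · subst hd
        rw [if_pos (by simp)]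
        simp only [List.length_cons, List.length_nil, List.drop_succ_cons, List.drop_zero]
        rw [ih fuel [] (cur.reverse :: acc) (by omega)]
        rw [show split0 (' ' :: t) = [] :: split0 t from by simp [split0]]
        cases hs : split0 t <;> simp
      · rw [if_neg (by simp [Ne.symm hd])]
        rw [ih fuel (d :: cur) acc (by omega)]
        have hsplit : split0 (d :: t) = (split0 t).modifyHead (d :: ·) := by simp [split0, hd]
        rw [hsplit]
        cases hs : split0 t with
        | nil => exact absurd hs (split0_ne_nil t)
        | cons a as => simp

theorem splitOn_space (l : List Char) : PySem.Chars.splitOn l [' '] = split0 l := by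
  rw [PySem.Chars.splitOn, splitOn_go_eq l (l.length + 1) [] [] (by omega)]
  cases hs : split0 l with
  | nil => exact absurd hs (split0_ne_nil l)
  | cons a as => simp

theorem tokens_eq (selector : String) :
    ((PySem.Str.split? selector " ").getD []).map String.toList = split0 selector.toList := by
  have h := PySem.Str.split?_map selector " "
  have hsep : (" " : String).toList = [' '] := by decide
  rw [hsep, PySem.Chars.split?] at h
  simp only [List.isEmpty_cons, Bool.false_eq_true, if_false, splitOn_space] at h
  cases hs : PySem.Str.split? selector " " with
  | none => rw [hs] at h; simp at h
  | some xs =>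
    rw [hs] at h
    simp only [Option.map_some, Option.some.injEq] at h
    simpa using h

-- split(' ') always produces (number of spaces) + 1 tokens
theorem split0_length (l : List Char) : (split0 l).length = l.count ' ' + 1 := by
  induction l with
  | nil => simp [split0]
  | cons c t ih =>
    by_cases hc : c = ' '
    · subst hc
      rw [show split0 (' ' :: t) = [] :: split0 t from by simp [split0]]
      simp [ih]
    · rw [show split0 (c :: t) = (split0 t).modifyHead (c :: ·) from by simp [split0, hc]]
      cases hs : split0 t with
      | nil => exact absurd hs (split0_ne_nil t)
      | cons a as =>
        rw [hs] at ih
        simp only [List.modifyHead_cons, List.length_cons] at *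
        rw [List.count_cons]
        simp [hc, ih]

-- the scan's prefixed-token tally equals the number of '.'/'#'-headed tokens of split0
theorem pcount_split0 (l : List Char) :
    pcount ' ' l = ((split0 l).countP prefTok : Int) ∧
    ∀ p, p ≠ ' ' → pcount p l = (((split0 l).tail).countP prefTok : Int) := by
  induction l with
  | nil => simp [pcount, split0, prefTok]
  | cons c t ih =>
    by_cases hc : c = ' '
    · subst hc
      rw [show split0 (' ' :: t) = [] :: split0 t from by simp [split0]]
      constructor
      · simp only [pcount, List.countP_cons]
        rw [ih.1]
        simp [prefTok]
      · intro p hp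
        simp only [pcount, List.tail_cons]
        rw [ih.1]
        simp
    · rw [show split0 (c :: t) = (split0 t).modifyHead (c :: ·) from by simp [split0, hc]]
      cases hs : split0 t with
      | nil => exact absurd hs (split0_ne_nil t)
      | cons a as =>
        rw [hs] at ih
        simp only [List.modifyHead_cons, List.tail_cons]
        have htail := ih.2 c hc
        simp only [List.tail_cons] at htail
        constructor
        · by_cases hcd : c = '.' ∨ c = '#'
          · have hpre : prefTok (c :: a) = true := by
              rcases hcd with h | h <;> simp [prefTok, h]
            simp only [pcount, List.countP_cons, htail, hpre]
            rw [if_pos ⟨hcd, trivial⟩, if_pos trivial]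
            push_cast; ring
          · have hpre : prefTok (c :: a) = false := by
              simp only [prefTok, Bool.or_eq_false_iff, decide_eq_false_iff_not]
              tauto
            simp only [pcount, List.countP_cons, htail, hpre]
            rw [if_neg (fun h => hcd h.1)]
            simp
        · intro p hp
          have hif : (if (c = '.' ∨ c = '#') ∧ p = ' ' then (1 : Int) else 0) = 0 :=
            if_neg (fun h => hp h.2)
          simp only [pcount, htail, hif]
          ring

-- the scan computes: counts of '.', '#', ' ', the prefixed-token tally, and the last char
theorem foldl_specAltStep (l : List Char) : ∀ (p : Char) (a b c d : Int),
    l.foldl specAltStep (a, b, c, d, p) =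
      (a + (l.count '.' : Int), b + (l.count '#' : Int), c + pcount p l,
       d + (l.count ' ' : Int), lastc p l) := by
  induction l with
  | nil => intro p a b c d; simp [pcount, lastc]
  | cons e t ih =>
    intro p a b c d
    simp only [List.foldl_cons, specAltStep]
    by_cases h1 : e = '.'
    · subst h1
      rw [if_pos (by trivial), ih]
      rw [List.count_cons_self, List.count_cons_of_ne (by decide : ('.' : Char) ≠ '#'),
          List.count_cons_of_ne (by decide : ('.' : Char) ≠ ' ')]
      by_cases hp : p = ' ' <;> simp [pcount, lastc, hp, Prod.ext_iff] <;> push_cast <;> try ring <;> try simp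
    · rw [if_neg h1]
      by_cases h2 : e = '#'
      · subst h2
        rw [if_pos (by trivial), ih]
        rw [List.count_cons_of_ne (by decide : ('#' : Char) ≠ '.'), List.count_cons_self,
            List.count_cons_of_ne (by decide : ('#' : Char) ≠ ' ')]
        by_cases hp : p = ' ' <;> simp [pcount, lastc, hp, Prod.ext_iff] <;> push_cast <;> try ring <;> try simp
      · rw [if_neg h2]
        by_cases h3 : e = ' '
        · subst h3
          rw [if_pos (by trivial), ih]
          rw [List.count_cons_of_ne (by decide : (' ' : Char) ≠ '.'),
              List.count_cons_of_ne (by decide : (' ' : Char) ≠ '#'), List.count_cons_self]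
          simp [pcount, lastc, Prod.ext_iff] <;> push_cast <;> ring
        · rw [if_neg h3, ih]
          rw [List.count_cons_of_ne h1, List.count_cons_of_ne h2, List.count_cons_of_ne h3]
          simp [pcount, lastc, Prod.ext_iff, h1, h2] <;> ring

-- A's per-token filter predicate, read on the character list
theorem startswith_prefTok (t : String) :
    (!(PySem.Str.startswith t "." || PySem.Str.startswith t "#")) = !prefTok t.toList := by
  rw [PySem.Str.startswith_eq, PySem.Str.startswith_eq]
  have h1 : ("." : String).toList = ['.'] := by decide
  have h2 : ("#" : String).toList = ['#'] := by decide
  rw [h1, h2]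
  cases ht : t.toList with
  | nil => simp [PySem.Chars.startswith, List.isPrefixOf, prefTok]
  | cons c cs =>
    have hp1 : List.isPrefixOf ['.'] (c :: cs) = ('.' == c) := by simp [List.isPrefixOf]
    have hp2 : List.isPrefixOf ['#'] (c :: cs) = ('#' == c) := by simp [List.isPrefixOf]
    simp only [PySem.Chars.startswith, hp1, hp2, prefTok]
    by_cases hc1 : c = '.'
    · subst hc1; decide
    · by_cases hc2 : c = '#'
      · subst hc2; decide
      · rw [show ('.' == c) = false from beq_eq_false_iff_ne.mpr (Ne.symm hc1),
            show ('#' == c) = false from beq_eq_false_iff_ne.mpr (Ne.symm hc2)]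
        simp [hc1, hc2]

-- A's element count, expressed over split0
theorem elementA_eq (selector : String) :
    ((((PySem.Str.split? selector " ").getD []).filter
        (fun a => !(PySem.Str.startswith a "." || PySem.Str.startswith a "#"))).length : Int)
      = ((split0 selector.toList).countP (fun t => !prefTok t) : Int) := by
  have h : (((PySem.Str.split? selector " ").getD []).filter
      (fun a => !(PySem.Str.startswith a "." || PySem.Str.startswith a "#"))).length
      = ((PySem.Str.split? selector " ").getD []).countP
          (fun a => !(PySem.Str.startswith a "." || PySem.Str.startswith a "#")) := by
    rw [List.countP_eq_length_filter]
  rw [h]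
  have hfun : (fun a => !(PySem.Str.startswith a "." || PySem.Str.startswith a "#"))
      = (fun a : String => !prefTok a.toList) := funext startswith_prefTok
  rw [hfun]
  have h3 := List.countP_map (p := fun t => !prefTok t) (f := String.toList)
    (l := ((PySem.Str.split? selector " ").getD []))
  rw [tokens_eq] at h3
  exact_mod_cast h3.symm

-- ===== VERDICT (by name: the statement is the Claim_ definition above) =====
theorem selector_specificity_py_spec : Claim_equal_selector_specificity_py := by
  intro selector priority _
  unfold Spec_selector_specificity_py selector_specificity_py selector_specificity_py_alt
  rw [foldl_specAltStep]
  simp only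
  rw [(pcount_split0 selector.toList).1, elementA_eq]
  rw [PySem.Str.count_eq, PySem.Str.count_eq]
  have h1 : ("." : String).toList = ['.'] := by decide
  have h2 : ("#" : String).toList = ['#'] := by decide
  rw [h1, h2, count_singleton, count_singleton]
  have hlen := split0_length selector.toList
  have hcp := List.length_eq_countP_add_countP prefTok (l := split0 selector.toList)
  have hE : ((split0 selector.toList).countP (fun t => !prefTok t) : Int)
      = (selector.toList.count ' ' : Int) + 1 - ((split0 selector.toList).countP prefTok : Int) := by
    have : (split0 selector.toList).countP (fun t => !prefTok t)
        = (split0 selector.toList).countP (fun a => decide ¬prefTok a = true) := by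
      apply List.countP_congr; intro a _; simp
    rw [this]
    omega
  rw [hE]
  ring_nf
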